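-- pv_equiv track=rewrite | github.com/genolyx/gx-exome | scripts/extract_hba_paralog_sites.py | mismatches_from_alignment
-- ===== SOURCE A (Python) =====
-- def mismatches_from_alignment(
--     alignment,
--     chrom: str,
--     start1: int,
--     start2: int,
-- ) -> list[tuple[int, str, int, str]]:
--     """
--     Map aligned columns to genomic coordinates.
--     start1/start2: 1-based start of each extracted interval on chrom.
--     """
--     a = alignment[0]
--     b = alignment[1]
--     g1 = start1
--     g2 = start2
--     out: list[tuple[int, str, int, str]] = []
--     for i in range(len(a)):
--         ca, cb = a[i], b[i]
--         if ca == "-":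
--             g2 += 1
--         elif cb == "-":
--             g1 += 1
--         else:
--             if ca != cb:
--                 out.append((g1, ca, g2, cb))
--             g1 += 1
--             g2 += 1
--     return out
-- ===== SOURCE B (Python) =====
-- def mismatches_from_alignment(
--     alignment,
--     chrom: str,
--     start1: int,
--     start2: int,
-- ) -> list[tuple[int, str, int, str]]:
--     # Two-pass: build prefix tables of non-gap counts, then emit mismatch columns.
--     a = alignment[0]
--     b = alignment[1]
--     n = len(a)
--     pa = [0] * (n + 1)
--     pb = [0] * (n + 1)
--     for i in range(n):
--         pa[i + 1] = pa[i] + (a[i] != "-")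
--         pb[i + 1] = pb[i] + (b[i] != "-")
--     return [
--         (start1 + pa[i], a[i], start2 + pb[i], b[i])
--         for i in range(n)
--         if a[i] != "-" and b[i] != "-" and a[i] != b[i]
--     ]
-- ===== Notes on version B (the rewrite author's own statement) =====
-- stated objective: alternative
-- what changed: Replaces the single running-coordinate pass (mutable g1/g2 updated by a branch chain) with a two-pass build-prefix-tables-then-filter structure: cumulative non-gap counts for each row, then a comprehension emitting (start1+pa[i], a[i], start2+pb[i], b[i]) at mismatch columns.
-- intended difference: On alignments containing a column where both rows are '-' followed by a later mismatch column, A returns that mismatch with its second coordinate advanced once per preceding both-gap column (an artefact of 'if ca == "-": g2 += 1' assuming the other row is not a gap), while B counts only non-gap characters of row 2, which is the intended genomic coordinate. — e.g. on mismatches_from_alignment(["-A", "-C"], "chr16", 1, 1): A returns [(1, "A", 2, "C")], B returns [(1, "A", 1, "C")]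
import Mathlib
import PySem

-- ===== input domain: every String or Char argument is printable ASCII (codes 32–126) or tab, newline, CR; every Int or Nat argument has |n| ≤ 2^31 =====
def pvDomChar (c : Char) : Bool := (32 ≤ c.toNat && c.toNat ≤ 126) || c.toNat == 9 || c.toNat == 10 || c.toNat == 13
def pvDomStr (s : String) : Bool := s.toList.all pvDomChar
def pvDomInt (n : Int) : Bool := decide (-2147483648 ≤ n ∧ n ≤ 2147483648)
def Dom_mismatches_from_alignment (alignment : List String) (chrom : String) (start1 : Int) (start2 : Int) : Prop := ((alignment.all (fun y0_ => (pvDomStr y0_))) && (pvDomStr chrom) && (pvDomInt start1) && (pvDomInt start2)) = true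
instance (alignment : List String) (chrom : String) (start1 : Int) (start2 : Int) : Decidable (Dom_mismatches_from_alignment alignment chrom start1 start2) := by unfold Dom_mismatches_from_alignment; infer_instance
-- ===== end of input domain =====

-- B replaces A's single running-coordinate pass by a build-prefix-tables-then-filter two-pass
-- structure (objective: alternative); on both-gap columns followed by a mismatch A's second
-- coordinate is off, stated below as the intended difference D_.


-- ===== PORT A =====
-- A's loop over i in range(len(a)), reading a[i], b[i], carried as parallel structural
-- recursion on the two char lists with the running state (g1, g2, out). When b is exhausted
-- before a, Python raises IndexError (excluded by Pre_); the recursion just stops there.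
def pvLoopA : List Char → List Char → Int → Int → List (Int × String × Int × String) → List (Int × String × Int × String)
  | [], _, _, _, out => out
  | _ :: _, [], _, _, out => out
  | ca :: a, cb :: b, g1, g2, out =>
    if ca = '-' then pvLoopA a b g1 (g2 + 1) out
    else if cb = '-' then pvLoopA a b (g1 + 1) g2 out
    else pvLoopA a b (g1 + 1) (g2 + 1)
      (if ca ≠ cb then out ++ [(g1, String.ofList [ca], g2, String.ofList [cb])] else out)

def mismatches_from_alignment (alignment : List String) (chrom : String) (start1 : Int) (start2 : Int) : List (Int × String × Int × String) :=
  let a := ((PySem.List.pyGet? alignment 0).getD "").toList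
  let b := ((PySem.List.pyGet? alignment 1).getD "").toList
  pvLoopA a b start1 start2 []

-- ===== PORT B =====
-- Source B's prefix-table loop: pvPrefixFrom acc s = [acc, acc + (s[0] != '-'), …] (length |s|+1).
def pvPrefixFrom (acc : Int) : List Char → List Int
  | [] => [acc]
  | c :: s => acc :: pvPrefixFrom (acc + (if c ≠ '-' then 1 else 0)) s

def mismatches_from_alignment_alt (alignment : List String) (chrom : String) (start1 : Int) (start2 : Int) : List (Int × String × Int × String) :=
  let a := ((PySem.List.pyGet? alignment 0).getD "").toList
  let b := ((PySem.List.pyGet? alignment 1).getD "").toList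
  let n := a.length
  let bt := b.take n                -- Source B reads only b[i] for i < n (IndexError beyond is outside Pre_)
  let pa := pvPrefixFrom 0 a
  let pb := pvPrefixFrom 0 bt
  (List.range n).filterMap (fun i =>
    let ca := a.getD i ' '
    let cb := bt.getD i ' '
    if ca ≠ '-' ∧ cb ≠ '-' ∧ ca ≠ cb then
      some (start1 + pa.getD i 0, String.ofList [ca], start2 + pb.getD i 0, String.ofList [cb])
    else none)

-- ===== PRECONDITION & SPEC =====
-- Pre_ excludes exactly the inputs where Python A raises IndexError: fewer than two rows,
-- or the second row shorter than the first (the loop reads b[i] for every i < len(a)).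
def Pre_mismatches_from_alignment (alignment : List String) (chrom : String) (start1 : Int) (start2 : Int) : Prop :=
  2 ≤ alignment.length ∧ ((alignment.getD 0 "").toList.length ≤ (alignment.getD 1 "").toList.length)
instance (alignment : List String) (chrom : String) (start1 : Int) (start2 : Int) : Decidable (Pre_mismatches_from_alignment alignment chrom start1 start2) := by unfold Pre_mismatches_from_alignment; infer_instance

def pvWitness_mismatches_from_alignment : List String × String × Int × Int := (["AC-G", "AG-T"], "chr16", 5, 7)

def pvMisCol (a b : List Char) (i : Nat) : Prop :=
  a.getD i ' ' ≠ '-' ∧ b.getD i ' ' ≠ '-' ∧ a.getD i ' ' ≠ b.getD i ' '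
def pvBad (a b : List Char) : Prop :=
  ∃ i, i < a.length ∧ i < b.length ∧ pvMisCol a b i ∧
    ∃ j, j < i ∧ a.getD j ' ' = '-' ∧ b.getD j ' ' = '-'

-- On alignments with a column where both rows are '-' followed by a later mismatch column,
-- A reports that mismatch with its second coordinate advanced once per preceding both-gap
-- column (an artefact of 'if ca == "-": g2 += 1' assuming the other row is not a gap),
-- while B counts only non-gap characters of row 2 — the intended genomic coordinate.
def D_mismatches_from_alignment (alignment : List String) (chrom : String) (start1 : Int) (start2 : Int) : Prop :=
  pvBad (alignment.getD 0 "").toList (alignment.getD 1 "").toList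
instance (alignment : List String) (chrom : String) (start1 : Int) (start2 : Int) : Decidable (D_mismatches_from_alignment alignment chrom start1 start2) := by
  unfold D_mismatches_from_alignment pvBad pvMisCol; infer_instance

def Spec_mismatches_from_alignment (alignment : List String) (chrom : String) (start1 : Int) (start2 : Int) (out : List (Int × String × Int × String)) : Prop := ¬ D_mismatches_from_alignment alignment chrom start1 start2 → out = mismatches_from_alignment_alt alignment chrom start1 start2
instance (alignment : List String) (chrom : String) (start1 : Int) (start2 : Int) (out : List (Int × String × Int × String)) : Decidable (Spec_mismatches_from_alignment alignment chrom start1 start2 out) := by unfold Spec_mismatches_from_alignment; infer_instance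

def pvDiffWitness_mismatches_from_alignment : List String × String × Int × Int := (["-A", "-C"], "chr16", 1, 1)
def pvDiffWitnessOut_mismatches_from_alignment : (List (Int × String × Int × String)) × (List (Int × String × Int × String)) :=
  ([(1, "A", 2, "C")], [(1, "A", 1, "C")])

-- ===== CLAIM (what is proved, stated in full; the proofs are below) =====
def Claim_unchanged_mismatches_from_alignment : Prop := ∀ (alignment : List String) (chrom : String) (start1 : Int) (start2 : Int), Dom_mismatches_from_alignment alignment chrom start1 start2 → Pre_mismatches_from_alignment alignment chrom start1 start2 → Spec_mismatches_from_alignment alignment chrom start1 start2 (mismatches_from_alignment alignment chrom start1 start2)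
def Claim_changed_mismatches_from_alignment : Prop := Dom_mismatches_from_alignment (pvDiffWitness_mismatches_from_alignment.1) (pvDiffWitness_mismatches_from_alignment.2.1) (pvDiffWitness_mismatches_from_alignment.2.2.1) (pvDiffWitness_mismatches_from_alignment.2.2.2) ∧ Pre_mismatches_from_alignment (pvDiffWitness_mismatches_from_alignment.1) (pvDiffWitness_mismatches_from_alignment.2.1) (pvDiffWitness_mismatches_from_alignment.2.2.1) (pvDiffWitness_mismatches_from_alignment.2.2.2) ∧ D_mismatches_from_alignment (pvDiffWitness_mismatches_from_alignment.1) (pvDiffWitness_mismatches_from_alignment.2.1) (pvDiffWitness_mismatches_from_alignment.2.2.1) (pvDiffWitness_mismatches_from_alignment.2.2.2) ∧ mismatches_from_alignment (pvDiffWitness_mismatches_from_alignment.1) (pvDiffWitness_mismatches_from_alignment.2.1) (pvDiffWitness_mismatches_from_alignment.2.2.1) (pvDiffWitness_mismatches_from_alignment.2.2.2) = pvDiffWitnessOut_mismatches_from_alignment.1 ∧ mismatches_from_alignment_alt (pvDiffWitness_mismatches_from_alignment.1) (pvDiffWitness_mismatches_from_alignment.2.1) (pvDiffWitness_mismatches_from_alignment.2.2.1)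 (pvDiffWitness_mismatches_from_alignment.2.2.2) = pvDiffWitnessOut_mismatches_from_alignment.2 ∧ pvDiffWitnessOut_mismatches_from_alignment.1 ≠ pvDiffWitnessOut_mismatches_from_alignment.2
def Claim_exact_mismatches_from_alignment : Prop := ∀ (alignment : List String) (chrom : String) (start1 : Int) (start2 : Int), Dom_mismatches_from_alignment alignment chrom start1 start2 → Pre_mismatches_from_alignment alignment chrom start1 start2 → D_mismatches_from_alignment alignment chrom start1 start2 → mismatches_from_alignment alignment chrom start1 start2 ≠ mismatches_from_alignment_alt alignment chrom start1 start2

-- ===== LEMMAS AND PROOFS =====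

-- increments of the two running coordinates at a column (ca, cb)
def pvInc (c : Char) : Int := if c ≠ '-' then 1 else 0
def pvIncA2 (ca cb : Char) : Int := if ca = '-' ∨ cb ≠ '-' then 1 else 0

-- A's loop with the accumulator factored out
def pvEmitA : List Char → List Char → Int → Int → List (Int × String × Int × String)
  | [], _, _, _ => []
  | _ :: _, [], _, _ => []
  | ca :: a, cb :: b, g1, g2 =>
    (if ca ≠ '-' ∧ cb ≠ '-' ∧ ca ≠ cb then [(g1, String.ofList [ca], g2, String.ofList [cb])] else []) ++
    pvEmitA a b (g1 + pvInc ca) (g2 + pvIncA2 ca cb)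

-- B's emission, the same recursion with B's second increment
def pvEmitB : List Char → List Char → Int → Int → List (Int × String × Int × String)
  | [], _, _, _ => []
  | _ :: _, [], _, _ => []
  | ca :: a, cb :: b, g1, g2 =>
    (if ca ≠ '-' ∧ cb ≠ '-' ∧ ca ≠ cb then [(g1, String.ofList [ca], g2, String.ofList [cb])] else []) ++
    pvEmitB a b (g1 + pvInc ca) (g2 + pvInc cb)

theorem pvLoopA_emitA : ∀ (a b : List Char) (g1 g2 : Int) (out : List (Int × String × Int × String)),
    pvLoopA a b g1 g2 out = out ++ pvEmitA a b g1 g2 := by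
  intro a
  induction a with
  | nil => intro b g1 g2 out; cases b <;> simp [pvLoopA, pvEmitA]
  | cons ca a ih =>
    intro b g1 g2 out
    cases b with
    | nil => simp [pvLoopA, pvEmitA]
    | cons cb b =>
      by_cases h1 : ca = '-'
      · simp [pvLoopA, pvEmitA, h1, pvInc, pvIncA2, ih]
      · by_cases h2 : cb = '-'
        · simp [pvLoopA, pvEmitA, h1, h2, pvInc, pvIncA2, ih]
        · by_cases h3 : ca = cb
          · simp [pvLoopA, pvEmitA, h1, h2, h3, pvInc, pvIncA2, ih]
          · simp [pvLoopA, pvEmitA, h1, h2, h3, pvInc, pvIncA2, ih]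

theorem pvPrefixFrom_getD : ∀ (s : List Char) (acc : Int) (i : Nat), i ≤ s.length →
    (pvPrefixFrom acc s).getD i 0 = acc + (pvPrefixFrom 0 s).getD i 0 := by
  intro s
  induction s with
  | nil =>
    intro acc i h
    simp only [List.length_nil, Nat.le_zero] at h
    subst h; simp [pvPrefixFrom]
  | cons c s ih =>
    intro acc i h
    cases i with
    | zero => simp [pvPrefixFrom]
    | succ i =>
      simp only [pvPrefixFrom, List.getD_cons_succ]
      rw [ih (acc + (if c ≠ '-' then 1 else 0)) i (by simpa using h),
          ih ((0:Int) + (if c ≠ '-' then 1 else 0)) i (by simpa using h)]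
      ring

theorem pvAlt_emitB : ∀ (a b : List Char) (g1 g2 : Int), a.length = b.length →
    (List.range a.length).filterMap (fun i =>
      if a.getD i ' ' ≠ '-' ∧ b.getD i ' ' ≠ '-' ∧ a.getD i ' ' ≠ b.getD i ' ' then
        some (g1 + (pvPrefixFrom 0 a).getD i 0, String.ofList [a.getD i ' '],
              g2 + (pvPrefixFrom 0 b).getD i 0, String.ofList [b.getD i ' '])
      else none) = pvEmitB a b g1 g2 := by
  intro a
  induction a with
  | nil => intro b g1 g2 h; simp [pvEmitB]
  | cons ca a ih =>
    intro b g1 g2 h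
    cases b with
    | nil => simp at h
    | cons cb b =>
      have hlen : a.length = b.length := by simpa using h
      simp only [List.length_cons, List.range_succ_eq_map, List.filterMap_cons, List.filterMap_map]
      have hcongr : (List.range a.length).filterMap
          ((fun i =>
            if (ca :: a).getD i ' ' ≠ '-' ∧ (cb :: b).getD i ' ' ≠ '-' ∧ (ca :: a).getD i ' ' ≠ (cb :: b).getD i ' ' then
              some (g1 + (pvPrefixFrom 0 (ca :: a)).getD i 0, String.ofList [(ca :: a).getD i ' '],
                    g2 + (pvPrefixFrom 0 (cb :: b)).getD i 0, String.ofList [(cb :: b).getD i ' '])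
            else none) ∘ Nat.succ) =
          (List.range a.length).filterMap (fun i =>
            if a.getD i ' ' ≠ '-' ∧ b.getD i ' ' ≠ '-' ∧ a.getD i ' ' ≠ b.getD i ' ' then
              some ((g1 + pvInc ca) + (pvPrefixFrom 0 a).getD i 0, String.ofList [a.getD i ' '],
                    (g2 + pvInc cb) + (pvPrefixFrom 0 b).getD i 0, String.ofList [b.getD i ' '])
            else none) := by
        apply List.filterMap_congr
        intro i hi
        simp only [List.mem_range] at hi
        simp only [Function.comp, List.getD_cons_succ, pvPrefixFrom]
        rw [pvPrefixFrom_getD a _ i (by omega), pvPrefixFrom_getD b _ i (by omega)]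
        split
        · simp [pvInc]; constructor <;> ring_nf
        · rfl
      rw [hcongr, ih b _ _ hlen]
      simp only [pvEmitB, pvPrefixFrom, List.getD_cons_zero]
      by_cases hc : ca ≠ '-' ∧ cb ≠ '-' ∧ ca ≠ cb
      · simp [hc]
      · simp [hc]

theorem pvEmitB_take : ∀ (a b : List Char) (g1 g2 : Int), a.length ≤ b.length →
    pvEmitB a b g1 g2 = pvEmitB a (b.take a.length) g1 g2 := by
  intro a
  induction a with
  | nil => intro b g1 g2 h; cases b <;> simp [pvEmitB]
  | cons ca a ih =>
    intro b g1 g2 h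
    cases b with
    | nil => simp at h
    | cons cb b =>
      simp only [List.length_cons, List.take_succ_cons, pvEmitB]
      rw [ih b _ _ (by simpa using h)]

theorem pvEmitA_take : ∀ (a b : List Char) (g1 g2 : Int), a.length ≤ b.length →
    pvEmitA a b g1 g2 = pvEmitA a (b.take a.length) g1 g2 := by
  intro a
  induction a with
  | nil => intro b g1 g2 h; cases b <;> simp [pvEmitA]
  | cons ca a ih =>
    intro b g1 g2 h
    cases b with
    | nil => simp at h
    | cons cb b =>
      simp only [List.length_cons, List.take_succ_cons, pvEmitA]
      rw [ih b _ _ (by simpa using h)]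

theorem pvGetD_take (b : List Char) (n k : Nat) (h : k < n) :
    (b.take n).getD k ' ' = b.getD k ' ' := by
  rw [List.getD_eq_getElem?_getD, List.getD_eq_getElem?_getD, List.getElem?_take_of_lt h]

theorem pvEmitA_nil : ∀ (a b : List Char) (g1 g2 : Int),
    (∀ i, i < a.length → i < b.length → ¬ pvMisCol a b i) → pvEmitA a b g1 g2 = [] := by
  intro a
  induction a with
  | nil => intro b g1 g2 h; cases b <;> simp [pvEmitA]
  | cons ca a ih =>
    intro b g1 g2 h
    cases b with
    | nil => simp [pvEmitA]
    | cons cb b =>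
      have h0 := h 0 (by simp) (by simp)
      simp only [pvMisCol, List.getD_cons_zero] at h0
      simp only [pvEmitA]
      rw [ih b _ _ (fun i hi1 hi2 hm => by
        refine h (i+1) (by simpa using hi1) (by simpa using hi2) ?_
        simpa [pvMisCol, List.getD_cons_succ] using hm)]
      simp [h0]

theorem pvEmitB_nil : ∀ (a b : List Char) (g1 g2 : Int),
    (∀ i, i < a.length → i < b.length → ¬ pvMisCol a b i) → pvEmitB a b g1 g2 = [] := by
  intro a
  induction a with
  | nil => intro b g1 g2 h; cases b <;> simp [pvEmitB]
  | cons ca a ih =>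
    intro b g1 g2 h
    cases b with
    | nil => simp [pvEmitB]
    | cons cb b =>
      have h0 := h 0 (by simp) (by simp)
      simp only [pvMisCol, List.getD_cons_zero] at h0
      simp only [pvEmitB]
      rw [ih b _ _ (fun i hi1 hi2 hm => by
        refine h (i+1) (by simpa using hi1) (by simpa using hi2) ?_
        simpa [pvMisCol, List.getD_cons_succ] using hm)]
      simp [h0]

theorem pvEmits_eq : ∀ (a b : List Char) (g1 g2 : Int), a.length ≤ b.length →
    ¬ pvBad a b → pvEmitA a b g1 g2 = pvEmitB a b g1 g2 := by
  intro a
  induction a with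
  | nil => intro b g1 g2 _ _; cases b <;> simp [pvEmitA, pvEmitB]
  | cons ca a ih =>
    intro b g1 g2 hlen hbad
    cases b with
    | nil => simp at hlen
    | cons cb b =>
      by_cases hbg : ca = '-' ∧ cb = '-'
      · have hnm : ∀ i, i < a.length → i < b.length → ¬ pvMisCol a b i := by
          intro i hi1 hi2 hm
          exact hbad ⟨i+1, by simpa using hi1, by simpa using hi2,
            by simpa [pvMisCol, List.getD_cons_succ] using hm,
            0, by omega, by simp [hbg.1], by simp [hbg.2]⟩
        simp only [pvEmitA, pvEmitB]
        rw [pvEmitA_nil _ _ _ _ hnm, pvEmitB_nil _ _ _ _ hnm]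
      · have hinc : pvIncA2 ca cb = pvInc cb := by
          by_cases h2 : cb = '-'
          · have hca : ¬ ca = '-' := fun hca => hbg ⟨hca, h2⟩
            simp [pvIncA2, pvInc, h2, hca]
          · simp [pvIncA2, pvInc, h2]
        have hbad' : ¬ pvBad a b := by
          rintro ⟨i, hi1, hi2, hm, j, hj, hja, hjb⟩
          exact hbad ⟨i+1, by simpa using hi1, by simpa using hi2,
            by simpa [pvMisCol, List.getD_cons_succ] using hm,
            j+1, by omega, by simpa using hja, by simpa using hjb⟩
        simp only [pvEmitA, pvEmitB, hinc]
        rw [ih b _ _ (by simpa using hlen) hbad']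

theorem pvBad_take : ∀ (a b : List Char), a.length ≤ b.length → pvBad a b → pvBad a (b.take a.length) := by
  rintro a b hle ⟨i, hi1, hi2, hm, j, hj, hja, hjb⟩
  refine ⟨i, hi1, by simp [List.length_take]; omega, ?_, j, hj, hja, ?_⟩
  · exact ⟨hm.1, by rw [pvGetD_take b a.length i hi1]; exact hm.2.1,
      by rw [pvGetD_take b a.length i hi1]; exact hm.2.2⟩
  · rw [pvGetD_take b a.length j (by omega)]; exact hjb

theorem pvEmits_ne_of_offset : ∀ (a b : List Char) (g1 g2 d : Int), 0 < d →
    (∃ i, i < a.length ∧ i < b.length ∧ pvMisCol a b i) →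
    pvEmitA a b g1 (g2 + d) ≠ pvEmitB a b g1 g2 := by
  intro a
  induction a with
  | nil =>
    rintro b g1 g2 d hd ⟨i, hi, -, -⟩
    simp at hi
  | cons ca a ih =>
    rintro b g1 g2 d hd ⟨i, hi1, hi2, hm⟩
    cases b with
    | nil => simp at hi2
    | cons cb b =>
      by_cases hc : ca ≠ '-' ∧ cb ≠ '-' ∧ ca ≠ cb
      · simp only [pvEmitA, pvEmitB, if_pos hc, List.singleton_append]
        intro h
        have := (List.cons.injEq _ _ _ _ ▸ h).1
        have : g2 + d = g2 := by
          have h2 := congrArg (fun p => p.2.2.1) this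
          simpa using h2
        omega
      · have hge : pvInc cb ≤ pvIncA2 ca cb ∧ pvIncA2 ca cb ≤ 1 ∧ 0 ≤ pvInc cb := by
          unfold pvInc pvIncA2
          by_cases h2 : cb = '-' <;> simp [h2] <;> split <;> omega
        have hmis' : ∃ i, i < a.length ∧ i < b.length ∧ pvMisCol a b i := by
          cases i with
          | zero =>
            exact absurd (by simpa [pvMisCol, List.getD_cons_zero] using hm) hc
          | succ i =>
            exact ⟨i, by simpa using hi1, by simpa using hi2,
              by simpa [pvMisCol, List.getD_cons_succ] using hm⟩
        simp only [pvEmitA, pvEmitB, if_neg hc, List.nil_append]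
        have harith : g2 + d + pvIncA2 ca cb = (g2 + pvInc cb) + (d + pvIncA2 ca cb - pvInc cb) := by ring
        rw [harith]
        exact ih b (g1 + pvInc ca) (g2 + pvInc cb) _ (by omega) hmis'

theorem pvEmits_ne : ∀ (a b : List Char) (g1 g2 : Int),
    pvBad a b → pvEmitA a b g1 g2 ≠ pvEmitB a b g1 g2 := by
  intro a
  induction a with
  | nil =>
    rintro b g1 g2 ⟨i, hi, -⟩
    simp at hi
  | cons ca a ih =>
    rintro b g1 g2 ⟨i, hi1, hi2, hm, j, hj, hja, hjb⟩
    cases b with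
    | nil => simp at hi2
    | cons cb b =>
      by_cases hbg : ca = '-' ∧ cb = '-'
      · -- head is a both-gap column: offset argument on the tails
        have hc : ¬ (ca ≠ '-' ∧ cb ≠ '-' ∧ ca ≠ cb) := fun h => h.1 hbg.1
        have hi0 : i ≠ 0 := by
          intro h; subst h
          exact hm.1 (by simpa [List.getD_cons_zero] using hbg.1)
        obtain ⟨i', rfl⟩ : ∃ i', i = i' + 1 := ⟨i - 1, by omega⟩
        have hmis' : ∃ k, k < a.length ∧ k < b.length ∧ pvMisCol a b k :=
          ⟨i', by simpa using hi1, by simpa using hi2,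
            by simpa [pvMisCol, List.getD_cons_succ] using hm⟩
        simp only [pvEmitA, pvEmitB, if_neg hc, List.nil_append]
        have h1 : pvIncA2 ca cb = 1 := by simp [pvIncA2, hbg.1]
        have h2 : pvInc cb = 0 := by simp [pvInc, hbg.2]
        rw [h1, h2, add_zero]
        exact pvEmits_ne_of_offset a b _ g2 1 (by omega) hmis'
      · -- head not both-gap: increments agree, recurse
        have hinc : pvIncA2 ca cb = pvInc cb := by
          by_cases h2 : cb = '-'
          · have hca : ¬ ca = '-' := fun hca => hbg ⟨hca, h2⟩
            simp [pvIncA2, pvInc, h2, hca]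
          · simp [pvIncA2, pvInc, h2]
        have hj0 : j ≠ 0 := by
          intro h; subst h
          exact hbg ⟨by simpa [List.getD_cons_zero] using hja, by simpa [List.getD_cons_zero] using hjb⟩
        obtain ⟨j', rfl⟩ : ∃ j', j = j' + 1 := ⟨j - 1, by omega⟩
        obtain ⟨i', rfl⟩ : ∃ i', i = i' + 1 := ⟨i - 1, by omega⟩
        have hbad' : pvBad a b :=
          ⟨i', by simpa using hi1, by simpa using hi2,
            by simpa [pvMisCol, List.getD_cons_succ] using hm,
            j', by omega, by simpa using hja, by simpa using hjb⟩
        simp only [pvEmitA, pvEmitB, hinc]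
        intro h
        exact ih b (g1 + pvInc ca) (g2 + pvInc cb) hbad' (List.append_cancel_left h)

-- ===== VERDICT (by name: the statement is the Claim_ definition above) =====
theorem mismatches_from_alignment_spec : Claim_unchanged_mismatches_from_alignment := by
  intro al chrom s1 s2 _hdom hpre hnd
  obtain ⟨hlen, hle⟩ := hpre
  cases al with
  | nil => simp at hlen
  | cons x al =>
    cases al with
    | nil => simp at hlen
    | cons y rest =>
      simp only [List.getD_cons_zero, List.getD_cons_succ] at hle
      have hle' : x.toList.length ≤ y.toList.length := hle
      have hleS : x.length ≤ y.length := by simpa using hle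
      have hbad : ¬ pvBad x.toList y.toList := by
        simpa [D_mismatches_from_alignment, List.getD_cons_zero, List.getD_cons_succ] using hnd
      have hget1 : PySem.List.pyGet? (x :: y :: rest) 1 = some y := by
        rw [show (1 : Int) = ((0 : Nat) : Int) + 1 by norm_num, PySem.List.pyGet?_cons_succ]
        simp
      simp only [mismatches_from_alignment, mismatches_from_alignment_alt,
        PySem.List.pyGet?_zero_cons, hget1, Option.getD_some]
      rw [pvLoopA_emitA, List.nil_append, pvEmits_eq _ _ _ _ hle' hbad,
        pvEmitB_take _ _ _ _ hle',
        ← pvAlt_emitB x.toList (y.toList.take x.toList.length) s1 s2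
          (by simp [List.length_take]; omega)]

theorem mismatches_from_alignment_changed : Claim_changed_mismatches_from_alignment := by
  unfold Claim_changed_mismatches_from_alignment; decide

theorem mismatches_from_alignment_tight : Claim_exact_mismatches_from_alignment := by
  intro al chrom s1 s2 _hdom hpre hd
  obtain ⟨hlen, hle⟩ := hpre
  cases al with
  | nil => simp at hlen
  | cons x al =>
    cases al with
    | nil => simp at hlen
    | cons y rest =>
      simp only [List.getD_cons_zero, List.getD_cons_succ] at hle
      have hle' : x.toList.length ≤ y.toList.length := hle
      have hleS : x.length ≤ y.length := by simpa using hle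
      have hbad : pvBad x.toList y.toList := by
        simpa [D_mismatches_from_alignment, List.getD_cons_zero, List.getD_cons_succ] using hd
      have hget1 : PySem.List.pyGet? (x :: y :: rest) 1 = some y := by
        rw [show (1 : Int) = ((0 : Nat) : Int) + 1 by norm_num, PySem.List.pyGet?_cons_succ]
        simp
      simp only [mismatches_from_alignment, mismatches_from_alignment_alt,
        PySem.List.pyGet?_zero_cons, hget1, Option.getD_some]
      rw [pvLoopA_emitA, List.nil_append, pvEmitA_take _ _ _ _ hle',
        pvAlt_emitB x.toList (y.toList.take x.toList.length) s1 s2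
          (by simp [List.length_take]; omega)]
      exact pvEmits_ne _ _ _ _ (pvBad_take _ _ hle' hbad)
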